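-- pv_equiv track=rewrite | github.com/KingWitherBrine/py | other/python/cowvid_19_I_II.py | largest_interior_gap
-- ===== SOURCE A (Python) =====
-- def largest_interior_gap(s):
--   max_gap_start, current_start = 0, -1
--   gap = 0
--   for i in range(len(s)):
--     if s[i] == '1':
--       if current_start != -1 and i - current_start > gap:
--         gap = i - current_start
--         max_gap_start = current_start
--       current_start = i
--   return gap, max_gap_start
-- ===== SOURCE B (Python) =====
-- def largest_interior_gap(s):
--     # Each interior piece of the split is the run of characters strictly between
--     # two consecutive separator occurrences, so its gap is len(piece)+1.
--     parts = s.split('1')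
--     gap, max_gap_start = 0, 0
--     pos = len(parts[0])  # index of the first separator occurrence (if any)
--     for piece in parts[1:-1]:
--         g = len(piece) + 1
--         if g > gap:
--             gap, max_gap_start = g, pos
--         pos += g
--     return gap, max_gap_start
-- ===== Notes on version B (the rewrite author's own statement) =====
-- stated objective: faster
-- what changed: B splits the string on the separator character and folds over the interior split segments (gap = segment length + 1, position tracked by cumulative segment lengths), instead of A's character-by-character scan with a last-seen sentinel index.
import Mathlib
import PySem

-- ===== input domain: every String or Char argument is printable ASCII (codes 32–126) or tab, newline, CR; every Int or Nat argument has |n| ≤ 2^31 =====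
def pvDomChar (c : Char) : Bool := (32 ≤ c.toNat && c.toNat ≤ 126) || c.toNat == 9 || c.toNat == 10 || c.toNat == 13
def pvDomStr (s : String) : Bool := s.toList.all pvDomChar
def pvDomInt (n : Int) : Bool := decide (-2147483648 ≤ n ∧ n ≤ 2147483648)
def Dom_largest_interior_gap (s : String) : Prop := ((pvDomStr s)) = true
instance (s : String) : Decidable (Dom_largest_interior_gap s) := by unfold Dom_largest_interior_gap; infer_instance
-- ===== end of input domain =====

-- B splits the string on '1' and folds over the interior split segments instead of A's
-- character-by-character scan with a last-seen sentinel; same O(n) cost, different algorithm.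


-- ===== PORT A =====
-- state = (gap, max_gap_start, current_start); the loop body of A for index i with char c = s[i]
def ligStepA (st : Int × Int × Int) (p : Int × Char) : Int × Int × Int :=
  if p.2 = '1' then
    if st.2.2 ≠ -1 ∧ p.1 - st.2.2 > st.1 then (p.1 - st.2.2, st.2.2, p.1)
    else (st.1, st.2.1, p.1)
  else st

def largest_interior_gap (s : String) : Int × Int :=
  let r := (PySem.List.pyRange 0 (s.toList.length : Int) 1).foldl
    (fun st i => ligStepA st (i, PySem.List.pyGetD s.toList i ' ')) (0, 0, -1)
  (r.1, r.2.1)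

-- ===== PORT B =====
-- state = (gap, max_gap_start, pos); the loop body of B for an interior split segment `piece`
def ligStepBseg (st : Int × Int × Int) (piece : List Char) : Int × Int × Int :=
  if (piece.length : Int) + 1 > st.1 then
    ((piece.length : Int) + 1, st.2.2, st.2.2 + ((piece.length : Int) + 1))
  else (st.1, st.2.1, st.2.2 + ((piece.length : Int) + 1))

def largest_interior_gap_alt (s : String) : Int × Int :=
  let parts := PySem.Chars.splitOn s.toList ['1']
  let r := (PySem.List.slice parts (some 1) (some (-1))).foldl ligStepBseg
    (0, 0, ((parts.headD []).length : Int))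
  (r.1, r.2.1)

-- ===== PRECONDITION & SPEC =====
def Spec_largest_interior_gap (s : String) (out : Int × Int) : Prop := out = largest_interior_gap_alt s
instance (s : String) (out : Int × Int) : Decidable (Spec_largest_interior_gap s out) := by unfold Spec_largest_interior_gap; infer_instance

-- ===== CLAIM (what is proved, stated in full; the proofs are below) =====
def Claim_equal_largest_interior_gap : Prop := ∀ (s : String), Dom_largest_interior_gap s → Spec_largest_interior_gap s (largest_interior_gap s)

-- ===== LEMMAS AND PROOFS =====

-- reference step on a consecutive pair of '1'-indices
def ligStepB (st : Int × Int) (p : Int × Int) : Int × Int :=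
  if p.2 - p.1 > st.1 then (p.2 - p.1, p.1) else st

-- A's fold skips non-'1' entries and, on '1' entries, depends only on the index
def ligStepA' (st : Int × Int × Int) (i : Int) : Int × Int × Int :=
  if st.2.2 ≠ -1 ∧ i - st.2.2 > st.1 then (i - st.2.2, st.2.2, i)
  else (st.1, st.2.1, i)

-- indices of '1' characters, offset k
def onesIdx : List Char → Int → List Int
  | [], _ => []
  | c :: t, k => if c = '1' then k :: onesIdx t (k + 1) else onesIdx t (k + 1)

-- structural reference model of s.split('1')
def mySplit : List Char → List (List Char)
  | [] => [[]]
  | c :: t => if c = '1' then [] :: mySplit t else (mySplit t).modifyHead (c :: ·)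

def consHead (x : List Char) : List (List Char) → List (List Char)
  | [] => [x]
  | h :: t => (x ++ h) :: t

-- positions of the '1' separators following the given segments, starting at pos
def posAux : List (List Char) → Int → List Int
  | [], _ => []
  | q :: qs, pos => pos :: posAux qs (pos + q.length + 1)

lemma mySplit_ne_nil (l : List Char) : mySplit l ≠ [] := by
  induction l with
  | nil => simp [mySplit]
  | cons c t ih =>
    simp only [mySplit]
    split_ifs
    · simp
    · cases h : mySplit t with
      | nil => exact absurd h ih
      | cons a b => simp [List.modifyHead]

lemma consHead_nil (xs : List (List Char)) (h : xs ≠ []) : consHead [] xs = xs := by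
  cases xs with
  | nil => exact absurd rfl h
  | cons a t => simp [consHead]

lemma ligStepA_filter (l : List (Int × Char)) (st : Int × Int × Int) :
    l.foldl ligStepA st
      = ((l.filter (fun p => p.2 = '1')).map (·.1)).foldl ligStepA' st := by
  induction l generalizing st with
  | nil => rfl
  | cons p t ih =>
    by_cases h : p.2 = '1'
    · simp only [List.foldl_cons, List.filter_cons, h, decide_true, if_pos, List.map_cons, ih]
      congr 1
      simp [ligStepA, ligStepA', h]
    · simp only [List.foldl_cons, List.filter_cons, decide_eq_true_eq, h, if_neg, ih,
        not_false_iff]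
      congr 1
      simp [ligStepA, h]

lemma ones_eq_onesIdx (l : List Char) : ∀ k : Int,
    ((PySem.List.enumerate l k).filter (fun p => p.2 = '1')).map (·.1) = onesIdx l k := by
  induction l with
  | nil => intro k; rfl
  | cons c t ih =>
    intro k
    simp only [PySem.List.enumerate, List.filter_cons, onesIdx]
    by_cases h : c = '1' <;> simp [h, ih]

lemma onesIdx_nonneg (l : List Char) : ∀ (k : Int), 0 ≤ k → ∀ x ∈ onesIdx l k, 0 ≤ x := by
  induction l with
  | nil => intro k _ x hx; simp [onesIdx] at hx
  | cons c t ih =>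
    intro k hk x hx
    simp only [onesIdx] at hx
    by_cases h : c = '1'
    · rw [if_pos h] at hx
      rcases List.mem_cons.mp hx with rfl | hx
      · exact hk
      · exact ih (k + 1) (by omega) x hx
    · rw [if_neg h] at hx
      exact ih (k + 1) (by omega) x hx

-- core invariant: once current_start is a real index (≥ 0), A's remaining fold computes
-- exactly the fold of ligStepB over the consecutive pairs (cs :: l).zip l
lemma ligKey (l : List Int) : ∀ (g m cs : Int), 0 ≤ cs → (∀ x ∈ l, 0 ≤ x) →
    ((l.foldl ligStepA' (g, m, cs)).1, (l.foldl ligStepA' (g, m, cs)).2.1)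
      = ((cs :: l).zip l).foldl ligStepB (g, m) := by
  induction l with
  | nil => intros; rfl
  | cons x t ih =>
    intro g m cs hcs hall
    have hx : 0 ≤ x := hall x (List.mem_cons_self ..)
    have ht : ∀ y ∈ t, 0 ≤ y := fun y hy => hall y (List.mem_cons_of_mem _ hy)
    have hne : cs ≠ -1 := by omega
    simp only [List.foldl_cons, List.zip_cons_cons]
    by_cases h : x - cs > g
    · have : ligStepA' (g, m, cs) x = (x - cs, cs, x) := by
        simp [ligStepA', hne, h]
      rw [this]
      have : ligStepB (g, m) (cs, x) = (x - cs, cs) := by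
        simp [ligStepB, h]
      rw [this, ih _ _ _ hx ht]
    · have : ligStepA' (g, m, cs) x = (g, m, x) := by
        simp [ligStepA']
        intro _; omega
      rw [this]
      have : ligStepB (g, m) (cs, x) = (g, m) := by
        simp [ligStepB]; omega
      rw [this, ih _ _ _ hx ht]

-- PySem's fuel-based split, specialised to the single-character separator '1'
lemma splitOn_go_spec (l : List Char) : ∀ (fuel : Nat) (cur : List Char)
    (acc : List (List Char)), l.length ≤ fuel →
    PySem.Chars.splitOn.go ['1'] fuel l cur acc
      = acc.reverse ++ consHead cur.reverse (mySplit l) := by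
  induction l with
  | nil =>
    intro fuel cur acc _
    cases fuel <;> simp [PySem.Chars.splitOn.go, mySplit, consHead]
  | cons c t ih =>
    intro fuel cur acc hfuel
    cases fuel with
    | zero => simp at hfuel
    | succ f =>
      rw [PySem.Chars.splitOn.go]
      by_cases h : c = '1'
      · have hpre : List.isPrefixOf ['1'] (c :: t) = true := by
          simp [List.isPrefixOf, h]
        rw [if_pos hpre]
        simp only [List.length_cons] at hfuel
        rw [show List.drop (['1'].length) (c :: t) = t by simp]
        rw [ih f [] (cur.reverse :: acc) (by omega)]
        simp only [List.reverse_nil]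
        rw [consHead_nil _ (mySplit_ne_nil t)]
        simp only [mySplit, if_pos h, consHead]
        simp
      · have hpre : List.isPrefixOf ['1'] (c :: t) = false := by
          simp [List.isPrefixOf]
          exact fun hc => absurd hc.symm h
        rw [if_neg (by simp [hpre])]
        simp only [List.length_cons] at hfuel
        rw [ih f (c :: cur) acc (by omega)]
        simp only [mySplit, if_neg h]
        congr 1
        rcases hsp : mySplit t with _ | ⟨p, ps⟩
        · exact absurd hsp (mySplit_ne_nil t)
        · simp [consHead, List.modifyHead]

lemma splitOn_eq_mySplit (l : List Char) :
    PySem.Chars.splitOn l ['1'] = mySplit l := by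
  rw [PySem.Chars.splitOn, splitOn_go_spec l (l.length + 1) [] [] (by omega)]
  simp [consHead_nil _ (mySplit_ne_nil l)]

lemma onesIdx_eq_posAux (l : List Char) : ∀ k : Int,
    onesIdx l k = posAux (mySplit l).tail (k + (((mySplit l).headD []).length : Int)) := by
  induction l with
  | nil => intro k; simp [onesIdx, mySplit, posAux]
  | cons c t ih =>
    intro k
    rcases hsp : mySplit t with _ | ⟨p, ps⟩
    · exact absurd hsp (mySplit_ne_nil t)
    · by_cases h : c = '1'
      · simp only [onesIdx, if_pos h, mySplit, hsp, List.tail_cons, List.headD_cons,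
          List.length_nil, Nat.cast_zero, add_zero, posAux]
        rw [ih (k + 1), hsp]
        simp only [List.tail_cons, List.headD_cons]
        congr 2
        ring
      · simp only [onesIdx, if_neg h, mySplit, hsp, List.modifyHead, List.tail_cons,
          List.headD_cons]
        rw [ih (k + 1), hsp]
        simp only [List.tail_cons, List.headD_cons, List.length_cons]
        congr 1
        push_cast; ring

-- B's segment fold computes the pair fold over consecutive '1'-positions
lemma zipFold (ps : List (List Char)) : ∀ (k g m : Int),
    ((posAux ps k).zip (posAux ps k).tail).foldl ligStepB (g, m)
      = ((ps.dropLast.foldl ligStepBseg (g, m, k)).1,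
         (ps.dropLast.foldl ligStepBseg (g, m, k)).2.1) := by
  induction ps with
  | nil => intros; rfl
  | cons q qs ih =>
    intro k g m
    cases qs with
    | nil => rfl
    | cons q2 rest =>
      have hd : (q :: q2 :: rest).dropLast = q :: (q2 :: rest).dropLast := by
        simp [List.dropLast]
      rw [hd]
      simp only [posAux, List.tail_cons, List.zip_cons_cons, List.foldl_cons]
      by_cases h : (q.length : Int) + 1 > g
      · have h1 : ligStepB (g, m) (k, k + q.length + 1) = ((q.length : Int) + 1, k) := by
          simp only [ligStepB, if_pos (by omega : k + (q.length : Int) + 1 - k > g)]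
          congr 1
          omega
        have h2 : ligStepBseg (g, m, k) q = ((q.length : Int) + 1, k, k + ((q.length : Int) + 1)) := by
          simp [ligStepBseg, h]
        rw [h1, h2]
        have := ih (k + q.length + 1) ((q.length : Int) + 1) k
        rw [show k + ((q.length : Int) + 1) = k + q.length + 1 by ring]
        exact this
      · have h1 : ligStepB (g, m) (k, k + q.length + 1) = (g, m) := by
          simp only [ligStepB]
          rw [if_neg (by omega)]
        have h2 : ligStepBseg (g, m, k) q = (g, m, k + ((q.length : Int) + 1)) := by
          simp [ligStepBseg, h]
        rw [h1, h2]
        have := ih (k + q.length + 1) g m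
        rw [show k + ((q.length : Int) + 1) = k + q.length + 1 by ring]
        exact this

lemma slice_one_negone (xs : List (List Char)) :
    PySem.List.slice xs (some 1) (some (-1)) = xs.tail.dropLast := by
  simp [PySem.List.slice, PySem.List.clampIdx]
  split_ifs with h1
  · simp [h1]
  · have hlen : 1 ≤ xs.length := List.length_pos_iff.mpr h1
    have h2 : min 1 xs.length = 1 := by omega
    have h3 : ((xs.length : Int) + -1).toNat = xs.length - 1 := by omega
    rw [h2, h3, ← List.drop_one, List.dropLast_eq_take, List.length_drop]

-- ===== VERDICT (by name: the statement is the Claim_ definition above) =====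
theorem largest_interior_gap_spec : Claim_equal_largest_interior_gap := by
  intro s _
  unfold Spec_largest_interior_gap largest_interior_gap largest_interior_gap_alt
  have h1 : (PySem.List.pyRange 0 (s.toList.length : Int) 1).foldl
      (fun st i => ligStepA st (i, PySem.List.pyGetD s.toList i ' ')) (0, 0, -1)
      = (PySem.List.enumerate s.toList 0).foldl ligStepA (0, 0, -1) := by
    rw [PySem.List.enumerate_eq_map_pyRange s.toList ' ', List.foldl_map]
    simp [PySem.List.len_eq]
  -- A's result as a pair fold over consecutive '1'-indices
  have hA : ((((PySem.List.pyRange 0 (s.toList.length : Int) 1).foldl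
      (fun st i => ligStepA st (i, PySem.List.pyGetD s.toList i ' ')) (0, 0, -1)).1,
      ((PySem.List.pyRange 0 (s.toList.length : Int) 1).foldl
      (fun st i => ligStepA st (i, PySem.List.pyGetD s.toList i ' ')) (0, 0, -1)).2.1) : Int × Int)
      = (((onesIdx s.toList 0).zip (onesIdx s.toList 0).tail).foldl ligStepB (0, 0)) := by
    rw [h1, ligStepA_filter, ones_eq_onesIdx]
    have hnn := onesIdx_nonneg s.toList 0 (le_refl 0)
    cases hons : onesIdx s.toList 0 with
    | nil => rfl
    | cons x t =>
      rw [hons] at hnn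
      have hx : 0 ≤ x := hnn x (List.mem_cons_self ..)
      have ht : ∀ y ∈ t, 0 ≤ y := fun y hy => hnn y (List.mem_cons_of_mem _ hy)
      simp only [List.foldl_cons, List.tail_cons]
      have hstep : ligStepA' (0, 0, -1) x = (0, 0, x) := by simp [ligStepA']
      rw [hstep, ligKey t 0 0 x hx ht]
  rw [hA]
  -- B's side
  dsimp only
  rw [splitOn_eq_mySplit, slice_one_negone]
  rcases hsp : mySplit s.toList with _ | ⟨p, ps⟩
  · exact absurd hsp (mySplit_ne_nil s.toList)
  · rw [onesIdx_eq_posAux, hsp]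
    simp only [List.tail_cons, List.headD_cons, zero_add]
    exact zipFold ps (p.length : Int) 0 0
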